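-- pv_equiv track=rewrite | github.com/SaurabhMahajan16/Python | arraySubset.py | minimum_segments_to_win
-- ===== SOURCE A (Python) =====
-- def minimum_segments_to_win(segments):
--     """
--     Function to determine the minimum number of segments player 1 should play to ensure
--     their score is greater than player 2's score.
--
--     Args:
--     segments (list): A list where each element represents a segment of the game.
--                      1 if the segment contains a coin, 0 otherwise.
--
--     Returns:
--     int: Minimum number of segments player 1 should play to win.
--     """
--
--     total_segments = len(segments)
--     player1_score, player2_score = 0, sum(segments)
--
--     for i in range(total_segments):
--         # Player 1 plays the current segment
--         player1_score += segments[i]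
--
--         # Update Player 2's score as they will play one less segment
--         player2_score -= segments[i]
--
--         # Check if Player 1's score is now greater than Player 2's
--         if player1_score > player2_score:
--             return i + 1  # Return the number of segments played by Player 1
--
--     # If Player 1 can never win, return total number of segments
--     return total_segments
-- ===== SOURCE B (Python) =====
-- def minimum_segments_to_win(segments):
--     """Backward scan: walk the segments from last to first, maintaining the
--     prefix sum p through index i, and keep the smallest winning index seen
--     (player 1 wins after i+1 segments iff 2*prefix_sum(i) > total)."""
--     total = sum(segments)
--     ans = len(segments)
--     p = total
--     for i in range(len(segments) - 1, -1, -1):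
--         if 2 * p > total:
--             ans = i + 1
--         p -= segments[i]
--     return ans
-- ===== Notes on version B (the rewrite author's own statement) =====
-- stated objective: alternative
-- what changed: Replaces A's forward two-score scan with early return by a backward scan over prefix sums that tracks the smallest index where 2*prefix > total, with no early exit and a single running sum.
import Mathlib
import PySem

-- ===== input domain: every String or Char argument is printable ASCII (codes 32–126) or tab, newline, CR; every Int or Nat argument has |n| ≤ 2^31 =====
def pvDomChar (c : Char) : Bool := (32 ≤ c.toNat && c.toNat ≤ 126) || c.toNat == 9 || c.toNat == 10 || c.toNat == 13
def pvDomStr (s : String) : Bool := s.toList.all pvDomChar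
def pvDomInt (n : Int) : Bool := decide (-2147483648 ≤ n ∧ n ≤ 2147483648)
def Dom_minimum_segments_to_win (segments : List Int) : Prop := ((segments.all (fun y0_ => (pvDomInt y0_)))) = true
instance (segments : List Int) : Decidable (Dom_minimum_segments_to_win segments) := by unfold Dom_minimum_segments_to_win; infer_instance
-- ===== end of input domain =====

-- B replaces A's forward two-score scan + early return by a backward scan over
-- prefix sums tracking the smallest winning index (objective: alternative, same O(n)).

-- ===== PORT A =====
-- forward loop: p1 += segments[i]; p2 -= segments[i]; return i+1 when p1 > p2
def goA : List Int → Nat → Int → Int → Int → Int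
  | [], _, _, _, n => n
  | x :: xs, i, p1, p2, n =>
    let p1' := p1 + x
    let p2' := p2 - x
    if p1' > p2' then ((i : Int) + 1) else goA xs (i + 1) p1' p2' n

def minimum_segments_to_win (segments : List Int) : Int :=
  goA segments 0 0 segments.sum (segments.length : Int)

-- ===== PORT B =====
-- backward loop over the reversed list: p is the prefix sum through the current
-- index (= length of the remaining reversed tail); keep smallest winning index+1
def goB : List Int → Int → Int → Int → Int
  | [], _, _, ans => ans
  | x :: rxs, total, p, ans =>
    let ans' := if 2 * p > total then ((rxs.length : Int) + 1) else ans
    goB rxs total (p - x) ans'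

def minimum_segments_to_win_alt (segments : List Int) : Int :=
  goB segments.reverse segments.sum segments.sum (segments.length : Int)

-- ===== PRECONDITION & SPEC =====
def Spec_minimum_segments_to_win (segments : List Int) (out : Int) : Prop := out = minimum_segments_to_win_alt segments
instance (segments : List Int) (out : Int) : Decidable (Spec_minimum_segments_to_win segments out) := by unfold Spec_minimum_segments_to_win; infer_instance

-- ===== CLAIM (what is proved, stated in full; the proofs are below) =====
def Claim_equal_minimum_segments_to_win : Prop := ∀ (segments : List Int), Dom_minimum_segments_to_win segments → Spec_minimum_segments_to_win segments (minimum_segments_to_win segments)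

-- ===== LEMMAS AND PROOFS =====

-- first 0-based index j of xs with 2*(s + prefix-sum through j) > t
def fw : List Int → Int → Int → Option Nat
  | [], _, _ => none
  | x :: r, s, t => if 2 * (s + x) > t then some 0 else (fw r (s + x) t).map (· + 1)

theorem option_map_or {α β : Type} (f : α → β) (a b : Option α) :
    (a.or b).map f = (a.map f).or (b.map f) := by
  cases a <;> cases b <;> rfl

theorem goA_char (xs : List Int) : ∀ (i : Nat) (s t n : Int),
    goA xs i s (t - s) n = (match fw xs s t with
      | some j => ((i : Int) + (j : Int) + 1)
      | none => n) := by
  induction xs with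
  | nil => intro i s t n; simp [goA, fw]
  | cons x r ih =>
    intro i s t n
    simp only [goA, fw, gt_iff_lt]
    by_cases h : t < 2 * (s + x)
    · rw [if_pos (by omega : t - s - x < s + x), if_pos h]; simp
    · rw [if_neg (by omega : ¬ t - s - x < s + x), if_neg h]
      have h2 : t - s - x = t - (s + x) := by ring
      rw [h2, ih (i + 1) (s + x) t n]
      cases fw r (s + x) t with
      | none => simp
      | some j => simp; ring

theorem fw_snoc (ys : List Int) : ∀ (y : Int) (s t : Int),
    fw (ys ++ [y]) s t =
      (fw ys s t).or (if 2 * (s + ys.sum + y) > t then some ys.length else none) := by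
  induction ys with
  | nil => intro y s t; simp [fw]
  | cons x r ih =>
    intro y s t
    simp only [List.cons_append, fw]
    by_cases h : 2 * (s + x) > t
    · simp [h]
    · simp only [h, if_false]
      rw [ih y (s + x) t, option_map_or]
      have hs : s + x + r.sum + y = s + (x :: r).sum + y := by simp [List.sum_cons]; ring
      rw [hs]
      by_cases h2 : 2 * (s + (x :: r).sum + y) > t
      · rw [if_pos h2, if_pos h2]; rfl
      · rw [if_neg h2, if_neg h2]; rfl

theorem goB_char (ys : List Int) : ∀ (s t ans : Int),
    goB ys.reverse t (s + ys.sum) ans = (match fw ys s t with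
      | some j => ((j : Int) + 1)
      | none => ans) := by
  induction ys using List.reverseRecOn with
  | nil => intro s t ans; simp [goB, fw]
  | append_singleton l y ih =>
    intro s t ans
    rw [List.reverse_append]
    simp only [List.reverse_singleton, List.singleton_append, goB, List.length_reverse,
      List.sum_append, List.sum_singleton]
    have hp : s + (l.sum + y) - y = s + l.sum := by ring
    have hc : s + (l.sum + y) = s + l.sum + y := by ring
    rw [hp, hc, ih s t]
    rw [fw_snoc l y s t]
    cases hfw : fw l s t with
    | some j => simp
    | none =>
      by_cases h2 : 2 * (s + l.sum + y) > t
      · simp only [Option.none_or, if_pos h2]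
      · simp only [Option.none_or, if_neg h2]

-- ===== VERDICT (by name: the statement is the Claim_ definition above) =====
theorem minimum_segments_to_win_spec : Claim_equal_minimum_segments_to_win := by
  intro segments _
  unfold Spec_minimum_segments_to_win minimum_segments_to_win minimum_segments_to_win_alt
  have hA := goA_char segments 0 0 segments.sum ((segments.length : Int))
  have hB := goB_char segments 0 segments.sum ((segments.length : Int))
  simp only [sub_zero] at hA
  simp only [zero_add] at hB
  rw [hA, hB]
  cases fw segments 0 segments.sum with
  | none => rfl
  | some j => simp
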